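-- pv_equiv track=rewrite | github.com/magimetal/dw-port-experiment | ui/dialog_box.py | _apply_typewriter
-- ===== SOURCE A (Python) =====
-- def _apply_typewriter(page: tuple[str, ...], char_reveal: int) -> tuple[str, ...]:
--     """Apply typewriter masking: only first `char_reveal` characters visible."""
--     if char_reveal < 0:
--         return page  # Fully revealed
--
--     result: list[str] = []
--     remaining = char_reveal
--     for line in page:
--         if remaining >= len(line):
--             result.append(line)
--             remaining -= len(line)
--         elif remaining > 0:
--             result.append(line[:remaining])
--             remaining = 0
--         else:
--             result.append("")
--
--     return tuple(result)
-- ===== SOURCE B (Python) =====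
-- def _apply_typewriter(page: tuple[str, ...], char_reveal: int) -> tuple[str, ...]:
--     """Apply typewriter masking: only first `char_reveal` characters visible."""
--     if char_reveal < 0:
--         return page  # Fully revealed
--     # offset of each line's first character within the whole page
--     offsets = []
--     total = 0
--     for line in page:
--         offsets.append(total)
--         total += len(line)
--     return tuple(line[:max(0, char_reveal - off)] for off, line in zip(offsets, page))
-- ===== Notes on version B (the rewrite author's own statement) =====
-- stated objective: simpler
-- what changed: Replaces the stateful running 'remaining' counter and its three-way branch with a prefix-sum of line starting offsets followed by one uniform clamped slice line[:max(0, char_reveal - offset)] per line.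
import Mathlib
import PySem

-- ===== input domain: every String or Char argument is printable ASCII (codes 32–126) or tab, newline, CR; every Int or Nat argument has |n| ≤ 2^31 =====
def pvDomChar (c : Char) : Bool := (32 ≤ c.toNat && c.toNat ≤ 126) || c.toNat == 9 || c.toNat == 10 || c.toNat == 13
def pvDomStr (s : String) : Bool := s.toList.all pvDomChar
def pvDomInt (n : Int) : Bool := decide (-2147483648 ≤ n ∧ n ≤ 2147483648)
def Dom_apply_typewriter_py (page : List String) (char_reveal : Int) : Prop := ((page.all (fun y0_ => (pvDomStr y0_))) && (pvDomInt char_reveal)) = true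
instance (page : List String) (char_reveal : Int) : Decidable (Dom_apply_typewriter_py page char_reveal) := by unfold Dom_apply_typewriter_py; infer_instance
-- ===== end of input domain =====

-- B replaces A's stateful 'remaining' counter and three-way branch with prefix-sum
-- line offsets and one uniform clamped slice per line (objective: simpler).


-- ===== PORT A =====
-- the 'for line in page' loop, carrying (result, remaining)
def applyTwLoopA (page : List String) (remaining : Int) (result : List String) : List String :=
  match page with
  | [] => result
  | line :: rest =>
    if remaining ≥ PySem.Str.len line then
      applyTwLoopA rest (remaining - PySem.Str.len line) (result ++ [line])
    else if remaining > 0 then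
      applyTwLoopA rest 0 (result ++ [PySem.Str.slice line none (some remaining)])
    else
      applyTwLoopA rest remaining (result ++ [""])

def apply_typewriter_py (page : List String) (char_reveal : Int) : List String :=
  if char_reveal < 0 then page
  else applyTwLoopA page char_reveal []

-- ===== PORT B =====
-- the offsets loop of Source B: offsets.append(total); total += len(line)
def twOffsetsB (page : List String) (total : Int) : List Int :=
  match page with
  | [] => []
  | line :: rest => total :: twOffsetsB rest (total + PySem.Str.len line)

def apply_typewriter_py_alt (page : List String) (char_reveal : Int) : List String :=
  if char_reveal < 0 then page
  else ((twOffsetsB page 0).zip page).map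
         (fun p => PySem.Str.slice p.2 none (some (max 0 (char_reveal - p.1))))

-- ===== PRECONDITION & SPEC =====
def Spec_apply_typewriter_py (page : List String) (char_reveal : Int) (out : List String) : Prop := out = apply_typewriter_py_alt page char_reveal
instance (page : List String) (char_reveal : Int) (out : List String) : Decidable (Spec_apply_typewriter_py page char_reveal out) := by unfold Spec_apply_typewriter_py; infer_instance

-- ===== CLAIM (what is proved, stated in full; the proofs are below) =====
def Claim_equal_apply_typewriter_py : Prop := ∀ (page : List String) (char_reveal : Int), Dom_apply_typewriter_py page char_reveal → Spec_apply_typewriter_py page char_reveal (apply_typewriter_py page char_reveal)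

-- ===== LEMMAS AND PROOFS =====

-- line[:r] with len(line) ≤ r is the whole line
theorem tw_slice_of_len_le (s : String) (r : Int) (h : PySem.Str.len s ≤ r) :
    PySem.Str.slice s none (some r) = s := by
  rw [← String.toList_inj, PySem.Str.toList_slice, PySem.Chars.slice_eq_listSlice,
      PySem.List.slice_to _ (le_trans (by simp [PySem.Str.len_eq]) h)]
  apply List.take_of_length_le
  have := h
  rw [PySem.Str.len_eq] at this
  omega

-- line[:0] is the empty string
theorem tw_slice_zero (s : String) : PySem.Str.slice s none (some 0) = "" := by
  rw [← String.toList_inj, PySem.Str.toList_slice, PySem.Chars.slice_eq_listSlice,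
      PySem.List.slice_to _ le_rfl]
  simp

-- on an exhausted budget A's loop emits "" for every remaining line
theorem tw_loopA_nonpos (page : List String) (r : Int) (acc : List String) (hr : r ≤ 0) :
    applyTwLoopA page r acc = acc ++ page.map (fun _ => "") := by
  induction page generalizing r acc with
  | nil => simp [applyTwLoopA]
  | cons line rest ih =>
    have hlen : (0 : Int) ≤ PySem.Str.len line := by
      rw [PySem.Str.len_eq]; exact Int.natCast_nonneg _
    by_cases h1 : r ≥ PySem.Str.len line
    · have hl0 : PySem.Str.len line = 0 := le_antisymm (le_trans h1 hr) hlen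
      have hline : line = "" := by
        rw [PySem.Str.len_eq] at hl0
        have hnil : line.toList = [] := List.length_eq_zero_iff.mp (by exact_mod_cast hl0)
        exact String.toList_inj.mp (by simp [hnil])
      simp only [applyTwLoopA, if_pos h1]
      rw [ih _ _ (by omega)]
      simp [hline]
    · have h2 : ¬ r > 0 := by omega
      simp only [applyTwLoopA, if_neg h1, if_neg h2]
      rw [ih _ _ hr]
      simp

-- on an exhausted budget B's map emits "" for every remaining line
theorem tw_mapB_nonpos (page : List String) (s base : Int) (hs : s ≤ base) :
    ((twOffsetsB page base).zip page).map
      (fun p => PySem.Str.slice p.2 none (some (max 0 (s - p.1))))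
      = page.map (fun _ => "") := by
  induction page generalizing base with
  | nil => simp [twOffsetsB]
  | cons line rest ih =>
    have hlen : (0 : Int) ≤ PySem.Str.len line := by
      rw [PySem.Str.len_eq]; exact Int.natCast_nonneg _
    simp only [twOffsetsB, List.zip_cons_cons, List.map_cons]
    rw [ih _ (by omega)]
    have : max 0 (s - base) = 0 := by omega
    rw [this, tw_slice_zero]

-- main invariant: A's loop state (remaining = r, offsets consumed up to base) matches
-- B's per-line formula max 0 ((r + base) - offset)
theorem tw_main (page : List String) (r base : Int) (acc : List String) (hr : 0 ≤ r) :
    applyTwLoopA page r acc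
      = acc ++ ((twOffsetsB page base).zip page).map
          (fun p => PySem.Str.slice p.2 none (some (max 0 ((r + base) - p.1)))) := by
  induction page generalizing r base acc with
  | nil => simp [applyTwLoopA, twOffsetsB]
  | cons line rest ih =>
    have hlen : (0 : Int) ≤ PySem.Str.len line := by
      rw [PySem.Str.len_eq]; exact Int.natCast_nonneg _
    simp only [twOffsetsB, List.zip_cons_cons, List.map_cons]
    by_cases h1 : r ≥ PySem.Str.len line
    · simp only [applyTwLoopA, if_pos h1]
      rw [ih (r - PySem.Str.len line) (base + PySem.Str.len line) (acc ++ [line]) (by omega)]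
      have he : r - PySem.Str.len line + (base + PySem.Str.len line) = r + base := by ring
      have hm : max 0 (r + base - base) = r := by omega
      rw [he, hm, tw_slice_of_len_le line r h1]
      simp
    · have hmax : max 0 (r + base - base) = r := by omega
      rw [hmax]
      have hmapz : ((twOffsetsB rest (base + PySem.Str.len line)).zip rest).map
          (fun p => PySem.Str.slice p.2 none (some (max 0 ((r + base) - p.1))))
          = rest.map (fun _ => "") := tw_mapB_nonpos rest (r + base) _ (by omega)
      by_cases h2 : r > 0
      · simp only [applyTwLoopA, if_neg h1, if_pos h2]
        rw [tw_loopA_nonpos rest 0 _ le_rfl, hmapz]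
        simp
      · have hr0 : r = 0 := by omega
        simp only [applyTwLoopA, if_neg h1, if_neg h2]
        rw [tw_loopA_nonpos rest r _ (by omega), hmapz, hr0, tw_slice_zero]
        simp

-- ===== VERDICT (by name: the statement is the Claim_ definition above) =====
theorem apply_typewriter_py_spec : Claim_equal_apply_typewriter_py := by
  intro page char_reveal _
  unfold Spec_apply_typewriter_py apply_typewriter_py apply_typewriter_py_alt
  by_cases h : char_reveal < 0
  · simp [h]
  · simp only [if_neg h]
    simpa using tw_main page char_reveal 0 [] (by omega)
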